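-- pv_equiv track=rewrite | github.com/saisankargochhayat/algo_quest | Company-Based/amazon/nearest_cities.py | findNearestCities
-- ===== SOURCE A (Python) =====
-- from typing import List
-- from collections import defaultdict
--
-- def findEuclidean(x1, x2, y1, y2) -> int:
--     return (abs(x1-x2)**2) + (abs(y1-y2)**2)
--
-- def findNearestCities(numOfPoints: int, points: List[str], xCoordinates: List[int], yCoordinates: List[int],
--                       numOfQueries: int, queries: List[str]) -> List[str]:
--     xMap = defaultdict(list)
--     yMap = defaultdict(list)
--     pointMap = dict()
--     for i in range(numOfPoints):
--         pointMap[points[i]] = (xCoordinates[i], yCoordinates[i])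
--         xMap[xCoordinates[i]].append((yCoordinates[i], points[i]))
--         yMap[yCoordinates[i]].append((xCoordinates[i], points[i]))
--     ans = []
--     # Now we have the maps we can use in our queries.
--     for j in range(numOfQueries):
--         qPoint = queries[j]
--         x1, y1 = pointMap[qPoint]
--         res = [] # would have tuples of (dist, point_name)
--         # Close points in xMap
--         xList, yList = xMap.get(x1),  yMap.get(y1)
--         # Calc for points where x coordinate matches
--         for y2, targetPoint in xList:
--             if targetPoint != qPoint:
--                 cDist = findEuclidean(x1, x1, y1, y2)
--                 res.append((cDist, targetPoint))
--         for x2, targetPoint in yList: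
--             if targetPoint != qPoint:
--                 cDist = findEuclidean(x1, x2, y1, y1)
--                 res.append((cDist, targetPoint))
--         if res:
--             ans.append(sorted(res)[0][1])
--         else:
--             ans.append(None)
--     return ans
-- ===== SOURCE B (Python) =====
-- def findNearestCities(numOfPoints, points, xCoordinates, yCoordinates, numOfQueries, queries):
--     cities = list(zip(points, xCoordinates, yCoordinates))[:max(numOfPoints, 0)]
--     coord = {p: (x, y) for p, x, y in cities}
--
--     def nearest(q):
--         x1, y1 = coord[q]
--         best = None
--         for p, x, y in cities:
--             if p == q:
--                 continue
--             if x == x1: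
--                 cand = ((y - y1) ** 2, p)
--             elif y == y1:
--                 cand = ((x - x1) ** 2, p)
--             else:
--                 continue
--             if best is None or cand < best:
--                 best = cand
--         return best[1] if best is not None else None
--
--     return [nearest(queries[j]) for j in range(numOfQueries)]
-- ===== Notes on version B (the rewrite author's own statement) =====
-- stated objective: simpler
-- what changed: B drops A's x-map/y-map/defaultdict machinery and the per-query sort entirely: it keeps one city list and, per query, does a single scan maintaining a running lexicographic minimum (dist, name), exploiting that sorted(res)[0] is just the minimum.
import Mathlib
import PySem

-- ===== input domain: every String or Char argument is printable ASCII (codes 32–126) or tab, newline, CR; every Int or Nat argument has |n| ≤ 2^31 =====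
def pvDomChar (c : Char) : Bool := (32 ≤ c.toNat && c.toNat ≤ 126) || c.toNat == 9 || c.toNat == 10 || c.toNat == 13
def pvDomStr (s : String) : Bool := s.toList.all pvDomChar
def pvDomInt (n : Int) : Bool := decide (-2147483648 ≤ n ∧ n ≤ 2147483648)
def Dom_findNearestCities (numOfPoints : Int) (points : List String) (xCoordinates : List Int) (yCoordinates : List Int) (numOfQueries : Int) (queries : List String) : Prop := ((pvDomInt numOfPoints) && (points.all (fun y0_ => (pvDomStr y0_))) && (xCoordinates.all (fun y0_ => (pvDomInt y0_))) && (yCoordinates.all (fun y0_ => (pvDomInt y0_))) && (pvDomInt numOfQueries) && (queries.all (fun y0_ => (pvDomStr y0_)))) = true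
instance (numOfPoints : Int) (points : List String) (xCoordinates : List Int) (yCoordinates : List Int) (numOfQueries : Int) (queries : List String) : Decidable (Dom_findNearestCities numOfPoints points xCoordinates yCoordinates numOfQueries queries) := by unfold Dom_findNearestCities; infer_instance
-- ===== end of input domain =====

-- B replaces A's x-map/y-map bookkeeping and per-query sort by one running-minimum scan
-- over the city list per query (simpler; same return value).

-- ===== PORT A =====
-- helper of A: findEuclidean(x1, x2, y1, y2)
def findEuclidean (x1 : Int) (x2 : Int) (y1 : Int) (y2 : Int) : Int :=
  |x1 - x2| ^ 2 + |y1 - y2| ^ 2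

-- body of A's query loop (verbatim transcription of the loop body)
def pvQueryA (pointMap : PySem.Dict String (Int × Int))
    (xMap : PySem.Dict Int (List (Int × String))) (yMap : PySem.Dict Int (List (Int × String)))
    (qPoint : String) : Option String :=
  match pointMap.get? qPoint with
  | none => none          -- Python KeyError: excluded by Pre_
  | some xy =>
    let x1 := xy.1; let y1 := xy.2
    match xMap.get? x1, yMap.get? y1 with
    | some xList, some yList =>
      let res := xList.foldl (fun r e =>
        if e.2 ≠ qPoint then r ++ [(findEuclidean x1 x1 y1 e.1, e.2)] else r) []
      let res := yList.foldl (fun r e =>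
        if e.2 ≠ qPoint then r ++ [(findEuclidean x1 e.1 y1 y1, e.2)] else r) res
      if res.isEmpty then none
      else
        match PySem.List.pyGet? (PySem.List.sorted2 res (fun p => p.1) (fun p => p.2)) 0 with
        | some best => some best.2
        | none => none
    | _, _ => none        -- xList/yList is None → Python TypeError; unreachable: key x1/y1 is present whenever qPoint is a known point

def findNearestCities (numOfPoints : Int) (points : List String) (xCoordinates : List Int) (yCoordinates : List Int) (numOfQueries : Int) (queries : List String) : List (Option String) :=
  -- build loop: pointMap/xMap/yMap over range(numOfPoints); points[i] etc. via pyGetD (IndexError excluded by Pre_)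
  let build := (PySem.List.pyRange 0 numOfPoints 1).foldl
    (fun s j =>
      let p := PySem.List.pyGetD points j ""
      let x := PySem.List.pyGetD xCoordinates j 0
      let y := PySem.List.pyGetD yCoordinates j 0
      (s.1.insert p (x, y),
       s.2.1.modify x [] (fun l => l ++ [(y, p)]),
       s.2.2.modify y [] (fun l => l ++ [(x, p)])))
    ((PySem.Dict.empty : PySem.Dict String (Int × Int)),
     (PySem.Dict.empty : PySem.Dict Int (List (Int × String))),
     (PySem.Dict.empty : PySem.Dict Int (List (Int × String))))
  -- query loop: ans.append(...) over range(numOfQueries); queries[j] via pyGet? (IndexError excluded by Pre_)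
  (PySem.List.pyRange 0 numOfQueries 1).foldl
    (fun ans j =>
      ans ++ [match PySem.List.pyGet? queries j with
              | none => none
              | some qPoint => pvQueryA build.1 build.2.1 build.2.2 qPoint]) []

-- ===== PORT B =====
-- helper of B: 'if best is None or cand < best: best = cand' (Python tuple <)
def pvUpd (best : Option (Int × String)) (cand : Int × String) : Option (Int × String) :=
  match best with
  | none => some cand
  | some b => if cand.1 < b.1 ∨ (cand.1 = b.1 ∧ cand.2 < b.2) then some cand else some b

-- helper of B: the nested 'nearest(q)'
def pvNearest (cities : List (String × Int × Int)) (coord : PySem.Dict String (Int × Int))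
    (q : String) : Option String :=
  match coord.get? q with
  | none => none          -- Python KeyError: excluded by Pre_
  | some xy =>
    let x1 := xy.1; let y1 := xy.2
    let best := cities.foldl (fun best t =>
      if t.1 = q then best
      else if t.2.1 = x1 then pvUpd best ((t.2.2 - y1) ^ 2, t.1)
      else if t.2.2 = y1 then pvUpd best ((t.2.1 - x1) ^ 2, t.1)
      else best) none
    match best with
    | some b => some b.2
    | none => none

def findNearestCities_alt (numOfPoints : Int) (points : List String) (xCoordinates : List Int) (yCoordinates : List Int) (numOfQueries : Int) (queries : List String) : List (Option String) :=
  -- cities = list(zip(points, xCoordinates, yCoordinates))[:max(numOfPoints, 0)]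
  let cities := PySem.List.slice (points.zip (xCoordinates.zip yCoordinates)) none (some (max numOfPoints 0))
  -- coord = {p: (x, y) for p, x, y in cities}
  let coord := cities.foldl (fun d t => d.insert t.1 (t.2.1, t.2.2))
    (PySem.Dict.empty : PySem.Dict String (Int × Int))
  -- [nearest(queries[j]) for j in range(numOfQueries)]; queries[j] via pyGet? (IndexError excluded by Pre_)
  (PySem.List.pyRange 0 numOfQueries 1).map
    (fun j =>
      match PySem.List.pyGet? queries j with
      | none => none
      | some q => pvNearest cities coord q)

-- ===== PRECONDITION & SPEC =====
-- Pre_ excludes exactly the inputs where Python A raises: an index count beyond a list's length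
-- (IndexError on points[i]/xCoordinates[i]/yCoordinates[i]/queries[j]) and a query that is not
-- one of the first numOfPoints point names (KeyError on pointMap[qPoint]).
def Pre_findNearestCities (numOfPoints : Int) (points : List String) (xCoordinates : List Int) (yCoordinates : List Int) (numOfQueries : Int) (queries : List String) : Prop :=
  numOfPoints ≤ (points.length : Int) ∧ numOfPoints ≤ (xCoordinates.length : Int) ∧
  numOfPoints ≤ (yCoordinates.length : Int) ∧ numOfQueries ≤ (queries.length : Int) ∧
  ∀ q ∈ queries.take numOfQueries.toNat, q ∈ points.take numOfPoints.toNat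

instance (numOfPoints : Int) (points : List String) (xCoordinates : List Int) (yCoordinates : List Int) (numOfQueries : Int) (queries : List String) : Decidable (Pre_findNearestCities numOfPoints points xCoordinates yCoordinates numOfQueries queries) := by unfold Pre_findNearestCities; infer_instance

def pvWitness_findNearestCities : Int × List String × List Int × List Int × Int × List String :=
  (2, ["a", "b"], [0, 0], [1, 2], 1, ["a"])

def Spec_findNearestCities (numOfPoints : Int) (points : List String) (xCoordinates : List Int) (yCoordinates : List Int) (numOfQueries : Int) (queries : List String) (out : List (Option String)) : Prop := out = findNearestCities_alt numOfPoints points xCoordinates yCoordinates numOfQueries queries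
instance (numOfPoints : Int) (points : List String) (xCoordinates : List Int) (yCoordinates : List Int) (numOfQueries : Int) (queries : List String) (out : List (Option String)) : Decidable (Spec_findNearestCities numOfPoints points xCoordinates yCoordinates numOfQueries queries out) := by unfold Spec_findNearestCities; infer_instance

-- ===== CLAIM (what is proved, stated in full; the proofs are below) =====
def Claim_equal_findNearestCities : Prop := ∀ (numOfPoints : Int) (points : List String) (xCoordinates : List Int) (yCoordinates : List Int) (numOfQueries : Int) (queries : List String), Dom_findNearestCities numOfPoints points xCoordinates yCoordinates numOfQueries queries → Pre_findNearestCities numOfPoints points xCoordinates yCoordinates numOfQueries queries → Spec_findNearestCities numOfPoints points xCoordinates yCoordinates numOfQueries queries (findNearestCities numOfPoints points xCoordinates yCoordinates numOfQueries queries)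

-- ===== LEMMAS AND PROOFS =====

-- Python's lexicographic order on (int, str) tuples
def pvLt (a b : Int × String) : Prop := a.1 < b.1 ∨ (a.1 = b.1 ∧ a.2 < b.2)

lemma pvLt_irrefl (a : Int × String) : ¬ pvLt a a := by
  simp [pvLt]

lemma pvLt_trans {a b c : Int × String} (h1 : pvLt a b) (h2 : pvLt b c) : pvLt a c := by
  rcases h1 with h1 | ⟨h1, h1'⟩ <;> rcases h2 with h2 | ⟨h2, h2'⟩
  · exact Or.inl (lt_trans h1 h2)
  · exact Or.inl (h2 ▸ h1)
  · exact Or.inl (h1 ▸ h2)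
  · exact Or.inr ⟨h1.trans h2, lt_trans h1' h2'⟩

lemma pvLt_asymm {a b : Int × String} (h1 : pvLt a b) : ¬ pvLt b a := by
  intro h2
  exact pvLt_irrefl a (pvLt_trans h1 h2)

lemma pvLt_total {a b : Int × String} (h1 : ¬ pvLt a b) (h2 : ¬ pvLt b a) : a = b := by
  rcases lt_trichotomy a.1 b.1 with h | h | h
  · exact absurd (Or.inl h) h1
  · rcases lt_trichotomy a.2 b.2 with h' | h' | h'
    · exact absurd (Or.inr ⟨h, h'⟩) h1
    · exact Prod.ext h h'
    · exact absurd (Or.inr ⟨h.symm, h'⟩) h2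
  · exact absurd (Or.inl h) h2


lemma pv_fe1 (x1 y1 b : Int) : findEuclidean x1 x1 y1 b = (b - y1) ^ 2 := by
  simp only [findEuclidean, sub_self, abs_zero]
  rw [sq_abs]; ring

lemma pv_fe2 (x1 y1 a : Int) : findEuclidean x1 a y1 y1 = (a - x1) ^ 2 := by
  simp only [findEuclidean, sub_self, abs_zero]
  rw [sq_abs]; ring

-- the candidate a city t contributes to query (q, x1, y1) in B's scan
def pvCand (q : String) (x1 y1 : Int) (t : String × Int × Int) : Option (Int × String) :=
  if t.1 = q then none
  else if t.2.1 = x1 then some ((t.2.2 - y1) ^ 2, t.1)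
  else if t.2.2 = y1 then some ((t.2.1 - x1) ^ 2, t.1)
  else none

-- ---- dict characterizations ----

lemma pv_get?_foldl_insert (C : List (String × Int × Int)) (d : PySem.Dict String (Int × Int)) (q : String) :
    (C.foldl (fun d t => d.insert t.1 (t.2.1, t.2.2)) d).get? q
    = C.foldl (fun acc t => if t.1 = q then some (t.2.1, t.2.2) else acc) (d.get? q) := by
  induction C generalizing d with
  | nil => rfl
  | cons t C ih =>
    simp only [List.foldl_cons]
    rw [ih, PySem.Dict.get?_insert]
    by_cases h : q = t.1
    · simp [h]
    · simp [h, Ne.symm h]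

lemma pv_foldl_acc_some (C : List (String × Int × Int)) (q : String) :
    ∀ (o : Option (Int × Int)) (xy : Int × Int),
    C.foldl (fun acc t => if t.1 = q then some (t.2.1, t.2.2) else acc) o = some xy →
    ((q, xy.1, xy.2) ∈ C) ∨ o = some xy := by
  induction C with
  | nil => intro o xy h; right; exact h
  | cons t C ih =>
    intro o xy h
    simp only [List.foldl_cons] at h
    rcases ih _ _ h with h' | h'
    · left; exact List.mem_cons_of_mem _ h'
    · by_cases ht : t.1 = q
      · rw [if_pos ht] at h'
        left
        have h2 : (t.2.1, t.2.2) = xy := by injection h'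
        have : t = (q, xy.1, xy.2) := by
          obtain ⟨a, b, c⟩ := t
          simp_all
        rw [this]
        exact List.mem_cons_self
      · rw [if_neg ht] at h'; right; exact h'

lemma pv_getD_modX : ∀ (C : List (String × Int × Int)) (d : PySem.Dict Int (List (Int × String))) (v : Int),
    (C.foldl (fun d t => d.modify t.2.1 [] (fun l => l ++ [(t.2.2, t.1)])) d).getD v []
    = d.getD v [] ++ (C.filter (fun t => decide (t.2.1 = v))).map (fun t => (t.2.2, t.1)) := by
  intro C
  induction C with
  | nil => intro d v; simp
  | cons t C ih =>
    intro d v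
    simp only [List.foldl_cons, List.filter_cons]
    rw [ih, PySem.Dict.getD_modify]
    by_cases h : t.2.1 = v
    · rw [if_pos h.symm]; simp [h]
    · rw [if_neg (Ne.symm h)]; simp [h]

lemma pv_getD_modY : ∀ (C : List (String × Int × Int)) (d : PySem.Dict Int (List (Int × String))) (v : Int),
    (C.foldl (fun d t => d.modify t.2.2 [] (fun l => l ++ [(t.2.1, t.1)])) d).getD v []
    = d.getD v [] ++ (C.filter (fun t => decide (t.2.2 = v))).map (fun t => (t.2.1, t.1)) := by
  intro C
  induction C with
  | nil => intro d v; simp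
  | cons t C ih =>
    intro d v
    simp only [List.foldl_cons, List.filter_cons]
    rw [ih, PySem.Dict.getD_modify]
    by_cases h : t.2.2 = v
    · rw [if_pos h.symm]; simp [h]
    · rw [if_neg (Ne.symm h)]; simp [h]

-- ---- A's per-query loop body, as filter/map ----

lemma pv_foldl_append_filter {β : Type} (q : String) (f : Int × String → β) :
    ∀ (l : List (Int × String)) (acc : List β),
    l.foldl (fun r e => if e.2 ≠ q then r ++ [f e] else r) acc
    = acc ++ (l.filter (fun e => decide (e.2 ≠ q))).map f := by
  intro l
  induction l with
  | nil => intro acc; simp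
  | cons e l ih =>
    intro acc
    simp only [List.foldl_cons, List.filter_cons]
    by_cases h : e.2 ≠ q
    · rw [if_pos h, ih]; simp [h]
    · rw [if_neg h, ih]; simp [h]

-- ---- minimality of sorted2's head ----

def pvBef (a b : Int × String) : Bool :=
  decide (a.1 < b.1) || (!decide (b.1 < a.1) && decide (a.2 < b.2))

lemma pvBef_iff (a b : Int × String) : pvBef a b = true ↔ pvLt a b := by
  simp only [pvBef, pvLt, Bool.or_eq_true, Bool.and_eq_true, Bool.not_eq_true',
    decide_eq_true_eq, decide_eq_false_iff_not]
  constructor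
  · rintro (h | ⟨h1, h2⟩)
    · exact Or.inl h
    · rcases lt_trichotomy a.1 b.1 with h | h | h
      · exact Or.inl h
      · exact Or.inr ⟨h, h2⟩
      · exact absurd h h1
  · rintro (h | ⟨h1, h2⟩)
    · exact Or.inl h
    · exact Or.inr ⟨by omega, h2⟩

lemma pv_insertBy_pairwise (x : Int × String) (ys : List (Int × String))
    (h : ys.Pairwise (fun a b => ¬ pvLt b a)) :
    (PySem.List.insertBy pvBef x ys).Pairwise (fun a b => ¬ pvLt b a) := by
  induction ys with
  | nil => simp [PySem.List.insertBy]
  | cons y ys ih =>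
    have hrec : PySem.List.insertBy pvBef x (y :: ys)
        = if pvBef x y then x :: y :: ys else y :: PySem.List.insertBy pvBef x ys := rfl
    rw [hrec]
    rcases List.pairwise_cons.mp h with ⟨hy, hys⟩
    by_cases hb : pvBef x y = true
    · rw [if_pos hb]
      have hxy : pvLt x y := (pvBef_iff x y).mp hb
      apply List.pairwise_cons.mpr
      refine ⟨?_, h⟩
      intro z hz
      rcases List.mem_cons.mp hz with rfl | hz'
      · exact pvLt_asymm hxy
      · intro hzx
        exact hy z hz' (pvLt_trans hzx hxy)
    · rw [if_neg hb]
      apply List.pairwise_cons.mpr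
      refine ⟨?_, ih hys⟩
      intro z hz
      rcases (PySem.List.mem_insertBy _ _ _ _).mp hz with rfl | hz'
      · exact fun h' => hb ((pvBef_iff z y).mpr h')
      · exact hy z hz'

lemma pv_sorted_pairwise (res : List (Int × String)) :
    (List.foldl (fun acc x => PySem.List.insertBy pvBef x acc) [] res).Pairwise
      (fun a b => ¬ pvLt b a) := by
  suffices h : ∀ acc : List (Int × String), acc.Pairwise (fun a b => ¬ pvLt b a) →
      (res.foldl (fun acc x => PySem.List.insertBy pvBef x acc) acc).Pairwise (fun a b => ¬ pvLt b a) by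
    exact h [] (by simp)
  induction res with
  | nil => intro acc hacc; exact hacc
  | cons t res ih =>
    intro acc hacc
    exact ih _ (pv_insertBy_pairwise t acc hacc)

lemma pv_sorted_head_min (res : List (Int × String)) (m : Int × String) (t : List (Int × String))
    (h : PySem.List.sorted2 res (fun p => p.1) (fun p => p.2) = m :: t) :
    m ∈ res ∧ ∀ y ∈ res, ¬ pvLt y m := by
  have hsort : PySem.List.sorted2 res (fun p => p.1) (fun p => p.2)
      = List.foldl (fun acc x => PySem.List.insertBy pvBef x acc) [] res := rfl
  have hperm := PySem.List.sorted2_perm res (fun p => p.1) (fun p => p.2) false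
  rw [h] at hperm
  have hmem : m ∈ res := hperm.subset List.mem_cons_self
  have hpw : (m :: t).Pairwise (fun a b => ¬ pvLt b a) := by
    rw [← h, hsort]; exact pv_sorted_pairwise res
  refine ⟨hmem, ?_⟩
  intro y hy
  rcases List.mem_cons.mp (hperm.symm.subset hy) with rfl | hy'
  · exact pvLt_irrefl y
  · exact (List.pairwise_cons.mp hpw).1 y hy'

-- ---- minimality of B's running minimum ----

lemma pv_foldl_upd_some (L : List (Int × String)) :
    ∀ (m : Int × String), ∃ m', L.foldl pvUpd (some m) = some m' ∧ (m' = m ∨ m' ∈ L) ∧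
      ¬ pvLt m m' ∧ ∀ y ∈ L, ¬ pvLt y m' := by
  induction L with
  | nil => intro m; exact ⟨m, rfl, Or.inl rfl, pvLt_irrefl m, by simp⟩
  | cons c L ih =>
    intro m
    by_cases hc : pvLt c m
    · have hupd : pvUpd (some m) c = some c := by
        simp only [pvUpd]; exact if_pos hc
      simp only [List.foldl_cons, hupd]
      obtain ⟨m', h1, h2, h3, h4⟩ := ih c
      refine ⟨m', h1, ?_, ?_, ?_⟩
      · rcases h2 with rfl | h2
        · exact Or.inr List.mem_cons_self
        · exact Or.inr (List.mem_cons_of_mem _ h2)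
      · intro hmm'
        exact h3 (pvLt_trans hc hmm')
      · intro y hy
        rcases List.mem_cons.mp hy with rfl | hy'
        · exact h3
        · exact h4 y hy'
    · have hupd : pvUpd (some m) c = some m := by
        simp only [pvUpd]; exact if_neg hc
      simp only [List.foldl_cons, hupd]
      obtain ⟨m', h1, h2, h3, h4⟩ := ih m
      refine ⟨m', h1, ?_, h3, ?_⟩
      · rcases h2 with rfl | h2
        · exact Or.inl rfl
        · exact Or.inr (List.mem_cons_of_mem _ h2)
      · intro y hy
        rcases List.mem_cons.mp hy with rfl | hy'
        · intro hym'
          by_cases hem : m' = m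
          · exact hc (hem ▸ hym')
          · have hm'm : pvLt m' m := by
              by_contra hnot
              exact hem (pvLt_total h3 hnot).symm
            exact hc (pvLt_trans hym' hm'm)
        · exact h4 y hy'

lemma pv_fold_min (L : List (Int × String)) (hne : L ≠ []) :
    ∃ m', L.foldl pvUpd none = some m' ∧ m' ∈ L ∧ ∀ y ∈ L, ¬ pvLt y m' := by
  cases L with
  | nil => exact absurd rfl hne
  | cons c L =>
    have h0 : pvUpd none c = some c := rfl
    simp only [List.foldl_cons, h0]
    obtain ⟨m', h1, h2, h3, h4⟩ := pv_foldl_upd_some L c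
    refine ⟨m', h1, ?_, ?_⟩
    · rcases h2 with rfl | h2
      · exact List.mem_cons_self
      · exact List.mem_cons_of_mem _ h2
    · intro y hy
      rcases List.mem_cons.mp hy with rfl | hy'
      · exact h3
      · exact h4 y hy'

-- ---- membership equivalence between A's res and B's candidates ----

lemma pv_res_mem (C : List (String × Int × Int)) (q : String) (x1 y1 : Int) (r : Int × String) :
    r ∈ ((((C.filter (fun t => decide (t.2.1 = x1))).map (fun t => (t.2.2, t.1))).filter
            (fun e => decide (e.2 ≠ q))).map (fun e => (findEuclidean x1 x1 y1 e.1, e.2))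
        ++ (((C.filter (fun t => decide (t.2.2 = y1))).map (fun t => (t.2.1, t.1))).filter
            (fun e => decide (e.2 ≠ q))).map (fun e => (findEuclidean x1 e.1 y1 y1, e.2)))
    ↔ r ∈ C.filterMap (pvCand q x1 y1) := by
  simp only [List.mem_append, List.mem_map, List.mem_filter, List.mem_filterMap,
    decide_eq_true_eq]
  constructor
  · rintro (⟨e, ⟨⟨t, ⟨htC, htx⟩, rfl⟩, hne⟩, rfl⟩ | ⟨e, ⟨⟨t, ⟨htC, hty⟩, rfl⟩, hne⟩, rfl⟩)
    · refine ⟨t, htC, ?_⟩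
      simp only [pvCand, if_neg hne, if_pos htx]
      rw [pv_fe1]
    · refine ⟨t, htC, ?_⟩
      by_cases htx : t.2.1 = x1
      · simp only [pvCand, if_neg hne, if_pos htx]
        rw [pv_fe2, hty, htx]
        simp
      · simp only [pvCand, if_neg hne, if_neg htx, if_pos hty]
        rw [pv_fe2]
  · rintro ⟨t, htC, hcand⟩
    simp only [pvCand] at hcand
    split_ifs at hcand with h1 h2 h3
    · obtain rfl : ((t.2.2 - y1) ^ 2, t.1) = r := Option.some.inj hcand
      exact Or.inl ⟨(t.2.2, t.1), ⟨⟨t, ⟨htC, h2⟩, rfl⟩, h1⟩, by rw [pv_fe1]⟩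
    · obtain rfl : ((t.2.1 - x1) ^ 2, t.1) = r := Option.some.inj hcand
      exact Or.inr ⟨(t.2.1, t.1), ⟨⟨t, ⟨htC, h3⟩, rfl⟩, h1⟩, by rw [pv_fe2]⟩

-- ---- the per-query equivalence ----

lemma pv_query_eq (C : List (String × Int × Int)) (q : String) :
    pvQueryA (C.foldl (fun d t => d.insert t.1 (t.2.1, t.2.2)) PySem.Dict.empty)
             (C.foldl (fun d t => d.modify t.2.1 [] (fun l => l ++ [(t.2.2, t.1)])) PySem.Dict.empty)
             (C.foldl (fun d t => d.modify t.2.2 [] (fun l => l ++ [(t.2.1, t.1)])) PySem.Dict.empty) q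
    = pvNearest C (C.foldl (fun d t => d.insert t.1 (t.2.1, t.2.2)) PySem.Dict.empty) q := by
  have hpm := pv_get?_foldl_insert C PySem.Dict.empty q
  rw [PySem.Dict.get?_empty] at hpm
  simp only [pvQueryA, pvNearest]
  rw [hpm]
  cases hq : C.foldl (fun acc t => if t.1 = q then some (t.2.1, t.2.2) else acc) none with
  | none => rfl
  | some xy =>
    obtain ⟨x1, y1⟩ := xy
    dsimp only
    have hw : (q, x1, y1) ∈ C := by
      rcases pv_foldl_acc_some C q none (x1, y1) hq with h | h
      · exact h
      · simp at h
    -- xMap.get(x1) and yMap.get(y1) are present, with the filtered entry lists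
    have hgx := pv_getD_modX C PySem.Dict.empty x1
    have hgy := pv_getD_modY C PySem.Dict.empty y1
    rw [PySem.Dict.getD_empty, List.nil_append] at hgx hgy
    cases hx : (C.foldl (fun d t => d.modify t.2.1 [] (fun l => l ++ [(t.2.2, t.1)])) PySem.Dict.empty).get? x1 with
    | none =>
      exfalso
      rw [PySem.Dict.getD_of_get?_eq_none _ _ hx] at hgx
      have : (y1, q) ∈ (C.filter (fun t => decide (t.2.1 = x1))).map (fun t => (t.2.2, t.1)) := by
        simp only [List.mem_map, List.mem_filter, decide_eq_true_eq]
        exact ⟨(q, x1, y1), ⟨hw, rfl⟩, rfl⟩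
      rw [← hgx] at this
      simp at this
    | some xl =>
      have hxl : xl = (C.filter (fun t => decide (t.2.1 = x1))).map (fun t => (t.2.2, t.1)) := by
        rw [PySem.Dict.getD_eq_get?_getD, hx] at hgx
        exact hgx
      cases hy : (C.foldl (fun d t => d.modify t.2.2 [] (fun l => l ++ [(t.2.1, t.1)])) PySem.Dict.empty).get? y1 with
      | none =>
        exfalso
        rw [PySem.Dict.getD_of_get?_eq_none _ _ hy] at hgy
        have : (x1, q) ∈ (C.filter (fun t => decide (t.2.2 = y1))).map (fun t => (t.2.1, t.1)) := by
          simp only [List.mem_map, List.mem_filter, decide_eq_true_eq]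
          exact ⟨(q, x1, y1), ⟨hw, rfl⟩, rfl⟩
        rw [← hgy] at this
        simp at this
      | some yl =>
        have hyl : yl = (C.filter (fun t => decide (t.2.2 = y1))).map (fun t => (t.2.1, t.1)) := by
          rw [PySem.Dict.getD_eq_get?_getD, hy] at hgy
          exact hgy
        subst hxl hyl
        dsimp only
        rw [pv_foldl_append_filter, pv_foldl_append_filter, List.nil_append]
        -- B's scan is the fold of pvUpd over the candidate list
        have hBfold : (C.foldl (fun best t =>
              if t.1 = q then best
              else if t.2.1 = x1 then pvUpd best ((t.2.2 - y1) ^ 2, t.1)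
              else if t.2.2 = y1 then pvUpd best ((t.2.1 - x1) ^ 2, t.1)
              else best) none)
            = (C.filterMap (pvCand q x1 y1)).foldl pvUpd none := by
          rw [List.foldl_filterMap]
          apply List.foldl_ext
          intro acc t _
          simp only [pvCand]
          split_ifs <;> rfl
        rw [hBfold]
        set R := (((C.filter (fun t => decide (t.2.1 = x1))).map (fun t => (t.2.2, t.1))).filter
              (fun e => decide (e.2 ≠ q))).map (fun e => (findEuclidean x1 x1 y1 e.1, e.2))
            ++ (((C.filter (fun t => decide (t.2.2 = y1))).map (fun t => (t.2.1, t.1))).filter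
              (fun e => decide (e.2 ≠ q))).map (fun e => (findEuclidean x1 e.1 y1 y1, e.2)) with hR
        set LB := C.filterMap (pvCand q x1 y1) with hLBdef
        have hmemiff : ∀ r, r ∈ R ↔ r ∈ LB := by
          intro r; rw [hR, hLBdef]; exact pv_res_mem C q x1 y1 r
        by_cases hres : R = []
        · have hLB : LB = [] := by
            rw [List.eq_nil_iff_forall_not_mem]
            intro r hr
            exact List.eq_nil_iff_forall_not_mem.mp hres r ((hmemiff r).mpr hr)
          rw [hres, hLB]
          simp
        · have hLB : LB ≠ [] := by
            intro h0
            exact hres (List.eq_nil_iff_forall_not_mem.mpr fun r hr =>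
              List.eq_nil_iff_forall_not_mem.mp h0 r ((hmemiff r).mp hr))
          rcases hs : PySem.List.sorted2 R (fun p => p.1) (fun p => p.2) with _ | ⟨m, tl⟩
          · exfalso
            have hperm := PySem.List.sorted2_perm R (fun p => p.1) (fun p => p.2) false
            rw [hs] at hperm
            exact hres hperm.nil_eq.symm
          · obtain ⟨hm_mem, hm_min⟩ := pv_sorted_head_min R m tl hs
            rcases pv_fold_min LB hLB with ⟨b, hb1, hb2, hb3⟩
            have hmb : m = b :=
              pvLt_total (fun h' => hb3 m ((hmemiff m).mp hm_mem) h')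
                (fun h' => hm_min b ((hmemiff b).mpr hb2) h')
            have hresE : R.isEmpty = false := by
              simp [hres]
            rw [hresE]
            simp only [Bool.false_eq_true, if_false, PySem.List.pyGet?_zero_cons, hb1, hmb]

-- ---- the build loop over range(n) is a fold over the zipped city list ----

lemma pv_foldl_range_zip {σ : Type} (g : σ → String × Int × Int → σ) (s0 : σ)
    (ps : List String) (xs ys : List Int) :
    ∀ (m : Nat), m ≤ ps.length → m ≤ xs.length → m ≤ ys.length →
    (List.range m).foldl (fun s k => g s (ps.getD k "", xs.getD k 0, ys.getD k 0)) s0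
    = ((ps.zip (xs.zip ys)).take m).foldl g s0 := by
  intro m
  induction m with
  | zero => intro _ _ _; simp
  | succ m ih =>
    intro hp hx hy
    have hm : m < (ps.zip (xs.zip ys)).length := by
      simp only [List.length_zip]
      omega
    rw [List.range_succ, List.foldl_append, ih (by omega) (by omega) (by omega),
      List.take_add_one, List.getElem?_eq_getElem hm, List.foldl_append]
    simp only [Option.toList_some, List.foldl_cons, List.foldl_nil]
    congr 1
    rw [List.getElem_zip, List.getElem_zip]
    rw [List.getD_eq_getElem ps "" (by omega), List.getD_eq_getElem xs 0 (by omega),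
      List.getD_eq_getElem ys 0 (by omega)]

lemma pv_foldl_range3 {σ : Type} (g : σ → String × Int × Int → σ) (s0 : σ)
    (n : Int) (ps : List String) (xs ys : List Int)
    (hp : n.toNat ≤ ps.length) (hx : n.toNat ≤ xs.length) (hy : n.toNat ≤ ys.length) :
    (PySem.List.pyRange 0 n 1).foldl
      (fun s j => g s (PySem.List.pyGetD ps j "", PySem.List.pyGetD xs j 0, PySem.List.pyGetD ys j 0)) s0
    = ((ps.zip (xs.zip ys)).take n.toNat).foldl g s0 := by
  rcases (by omega : n ≤ 0 ∨ 0 < n) with h | h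
  · rw [PySem.List.pyRange_one_eq_nil (by omega)]
    have h0 : n.toNat = 0 := by omega
    simp [h0]
  · rw [PySem.List.pyRange_one, List.foldl_map]
    simp only [zero_add, sub_zero, PySem.List.pyGetD_natCast]
    exact pv_foldl_range_zip g s0 ps xs ys n.toNat hp hx hy

-- splitting a three-accumulator loop into three loops
lemma pv_foldl_triple {α β γ δ : Type} (f : α → δ → α) (g : β → δ → β) (h : γ → δ → γ) :
    ∀ (l : List δ) (a : α) (b : β) (c : γ),
    l.foldl (fun s e => (f s.1 e, g s.2.1 e, h s.2.2 e)) (a, b, c)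
    = (l.foldl f a, l.foldl g b, l.foldl h c) := by
  intro l
  induction l with
  | nil => intro a b c; rfl
  | cons e l ih => intro a b c; simp only [List.foldl_cons]; exact ih _ _ _

-- ---- main equality ----

lemma pv_main (nP : Int) (pts : List String) (xs ys : List Int) (nQ : Int) (qs : List String)
    (hp : nP.toNat ≤ pts.length) (hx : nP.toNat ≤ xs.length) (hy : nP.toNat ≤ ys.length) :
    findNearestCities nP pts xs ys nQ qs = findNearestCities_alt nP pts xs ys nQ qs := by
  simp only [findNearestCities, findNearestCities_alt]
  rw [PySem.List.slice_to _ (by omega : (0:Int) ≤ max nP 0)]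
  have hmax : (max nP 0).toNat = nP.toNat := by omega
  rw [hmax]
  have hbuild : (PySem.List.pyRange 0 nP 1).foldl
      (fun (s : PySem.Dict String (Int × Int) × PySem.Dict Int (List (Int × String)) × PySem.Dict Int (List (Int × String))) (j : Int) =>
        (s.1.insert (PySem.List.pyGetD pts j "") (PySem.List.pyGetD xs j 0, PySem.List.pyGetD ys j 0),
         s.2.1.modify (PySem.List.pyGetD xs j 0) [] (fun l => l ++ [(PySem.List.pyGetD ys j 0, PySem.List.pyGetD pts j "")]),
         s.2.2.modify (PySem.List.pyGetD ys j 0) [] (fun l => l ++ [(PySem.List.pyGetD xs j 0, PySem.List.pyGetD pts j "")])))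
      ((PySem.Dict.empty : PySem.Dict String (Int × Int)),
       (PySem.Dict.empty : PySem.Dict Int (List (Int × String))),
       (PySem.Dict.empty : PySem.Dict Int (List (Int × String))))
      = (((pts.zip (xs.zip ys)).take nP.toNat).foldl (fun d t => d.insert t.1 (t.2.1, t.2.2)) PySem.Dict.empty,
         ((pts.zip (xs.zip ys)).take nP.toNat).foldl (fun d t => d.modify t.2.1 [] (fun l => l ++ [(t.2.2, t.1)])) PySem.Dict.empty,
         ((pts.zip (xs.zip ys)).take nP.toNat).foldl (fun d t => d.modify t.2.2 [] (fun l => l ++ [(t.2.1, t.1)])) PySem.Dict.empty) := by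
    refine Eq.trans (pv_foldl_range3
      (g := fun (s : PySem.Dict String (Int × Int) × PySem.Dict Int (List (Int × String)) × PySem.Dict Int (List (Int × String))) (t : String × Int × Int) => (s.1.insert t.1 (t.2.1, t.2.2),
        s.2.1.modify t.2.1 [] (fun l => l ++ [(t.2.2, t.1)]),
        s.2.2.modify t.2.2 [] (fun l => l ++ [(t.2.1, t.1)]))) _ nP pts xs ys hp hx hy) ?_
    exact pv_foldl_triple
      (fun (d : PySem.Dict String (Int × Int)) (t : String × Int × Int) => d.insert t.1 (t.2.1, t.2.2))
      (fun (d : PySem.Dict Int (List (Int × String))) (t : String × Int × Int) => d.modify t.2.1 [] (fun l => l ++ [(t.2.2, t.1)]))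
      (fun (d : PySem.Dict Int (List (Int × String))) (t : String × Int × Int) => d.modify t.2.2 [] (fun l => l ++ [(t.2.1, t.1)])) _ _ _ _
  rw [hbuild]
  rw [PySem.List.foldl_append_singleton_eq_map, List.nil_append]
  apply List.map_congr_left
  intro j _
  cases PySem.List.pyGet? qs j with
  | none => rfl
  | some q => exact pv_query_eq ((pts.zip (xs.zip ys)).take nP.toNat) q

-- ===== VERDICT (by name: the statement is the Claim_ definition above) =====
theorem findNearestCities_spec : Claim_equal_findNearestCities := by
  intro numOfPoints points xCoordinates yCoordinates numOfQueries queries _hDom hPre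
  unfold Spec_findNearestCities
  obtain ⟨h1, h2, h3, _, _⟩ := hPre
  exact pv_main numOfPoints points xCoordinates yCoordinates numOfQueries queries
    (by omega) (by omega) (by omega)
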